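-- pv_equiv track=rewrite | github.com/MrBrantCode/unitest_baseline | mut_generate/mist_train_taco/taco_8846/solution.py | find_minimum_days_to_collect_maps
-- ===== SOURCE A (Python) =====
-- def find_minimum_days_to_collect_maps(n, schedules):
--     days = [[] for _ in range(31)]
--
--     for i in range(n):
--         hima = schedules[i]
--         for d in hima[1:]:
--             days[d].append(i)
--
--     tos = [{i} for i in range(n)]
--     end = {i for i in range(n)}
--
--     for i in range(1, 31):
--         gather = set()
--         for to in days[i]:
--             gather = gather | tos[to]
--         if gather == end:
--             return i
--         for to in days[i]:
--             tos[to] = gather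
--
--     return -1
-- ===== SOURCE B (Python) =====
-- def find_minimum_days_to_collect_maps(n, schedules):
--     def present(d):
--         return {p for p in range(n) if d in schedules[p][1:]}
--     people = set(range(n))
--     for i in range(1, 31):
--         reach = present(i)
--         for d in reversed(range(1, i)):
--             pd = present(d)
--             if not reach.isdisjoint(pd):
--                 reach |= pd
--         if reach == people:
--             return i
--     return -1
-- ===== Notes on version B (the rewrite author's own statement) =====
-- stated objective: alternative
-- what changed: Replaces A's forward simulation of per-person map-set state (31 day-buckets, union-and-broadcast of evolving sets) by a stateless per-candidate-day backward reachability check: for each day i it recomputes from the schedules alone the set of people temporally connected to day i's attendees by scanning days i-1..1 backward, so no per-person map-sets or bucket table exist at all. Pre_ restricts to the task's natural domain (n <= len(schedules), every listed day in [0,30]); …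
-- outside the precondition, e.g. on find_minimum_days_to_collect_maps(1, [[0, -1]]): A returns 30, B returns -1
-- crash fix: On inputs with some listed day outside [-31,30] (within the first n schedules, n <= len(schedules)) A raises IndexError while B, which never indexes a bucket array by day, returns its normal answer (-1 at the witness). — e.g. on find_minimum_days_to_collect_maps(1, [[0, 99]]): A raises IndexError, B returns -1
import Mathlib
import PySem

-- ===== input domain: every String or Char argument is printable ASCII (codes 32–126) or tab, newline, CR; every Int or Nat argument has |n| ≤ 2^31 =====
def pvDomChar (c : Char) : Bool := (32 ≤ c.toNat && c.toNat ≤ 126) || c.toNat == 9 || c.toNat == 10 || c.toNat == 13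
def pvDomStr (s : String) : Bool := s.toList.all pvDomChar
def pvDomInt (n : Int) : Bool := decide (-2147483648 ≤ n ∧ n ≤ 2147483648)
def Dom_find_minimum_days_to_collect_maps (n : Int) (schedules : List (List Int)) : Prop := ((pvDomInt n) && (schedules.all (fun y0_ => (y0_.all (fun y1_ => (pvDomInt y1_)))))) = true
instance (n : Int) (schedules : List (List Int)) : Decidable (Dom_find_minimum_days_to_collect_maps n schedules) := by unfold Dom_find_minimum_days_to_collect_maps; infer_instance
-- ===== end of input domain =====

-- B replaces A's forward simulation of evolving per-person map-sets by a stateless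
-- per-candidate-day backward reachability check over the schedules (objective: alternative).

-- ===== PORT A =====
-- days[d].append(i); Python raises IndexError for d outside [-31,30]: those inputs are outside Pre_
def pvDayAppend (p : Int) (days : List (List Int)) (d : Int) : List (List Int) :=
  PySem.List.pySetD days d ((PySem.List.pyGetD days d []) ++ [p])

-- the first double loop of A; schedules[i] raises IndexError for i ≥ len(schedules): outside Pre_
def pvBuildDays (n : Int) (schedules : List (List Int)) : List (List Int) :=
  (PySem.List.pyRange 0 n 1).foldl
    (fun days i =>
      (PySem.List.slice (PySem.List.pyGetD schedules i []) (some 1) none).foldl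
        (pvDayAppend i) days)
    (List.replicate 31 [])

-- gather = set(); for to in days[i]: gather = gather | tos[to]
def pvGatherA (bucket : List Int) (tos : List (PySem.Set Int)) : PySem.Set Int :=
  bucket.foldl (fun g q => PySem.Set.union g (PySem.List.pyGetD tos q PySem.Set.empty))
    PySem.Set.empty

-- for i in range(1, 31): … return i / return -1
def pvLoopA (ds : List Int) (days : List (List Int)) (tos : List (PySem.Set Int))
    (endS : PySem.Set Int) : Int :=
  match ds with
  | [] => -1
  | i :: rest =>
    let bucket := PySem.List.pyGetD days i []
    let gather := pvGatherA bucket tos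
    if PySem.Set.equal gather endS then i
    else pvLoopA rest days (bucket.foldl (fun t q => PySem.List.pySetD t q gather) tos) endS

def find_minimum_days_to_collect_maps (n : Int) (schedules : List (List Int)) : Int :=
  pvLoopA (PySem.List.pyRange 1 31 1) (pvBuildDays n schedules)
    ((PySem.List.pyRange 0 n 1).map (fun i => PySem.Set.ofList [i]))
    (PySem.Set.ofList (PySem.List.pyRange 0 n 1))

-- ===== PORT B =====
-- present(d) = {p for p in range(n) if d in schedules[p][1:]}
def pvPresentB (n : Int) (schedules : List (List Int)) (d : Int) : PySem.Set Int :=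
  PySem.Set.ofList ((PySem.List.pyRange 0 n 1).filter
    (fun p => (PySem.List.slice (PySem.List.pyGetD schedules p []) (some 1) none).contains d))

-- for d in reversed(range(1, i)): pd = present(d); if not reach.isdisjoint(pd): reach |= pd
def pvBackB (n : Int) (schedules : List (List Int)) (ds : List Int)
    (reach : PySem.Set Int) : PySem.Set Int :=
  ds.foldl (fun r d =>
    let pd := pvPresentB n schedules d
    if PySem.Set.isdisjoint r pd then r else PySem.Set.union r pd) reach

-- for i in range(1, 31): … return i / return -1
def pvLoopB (ds : List Int) (n : Int) (schedules : List (List Int))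
    (people : PySem.Set Int) : Int :=
  match ds with
  | [] => -1
  | i :: rest =>
    let reach := pvBackB n schedules (PySem.List.pyRange 1 i 1).reverse
      (pvPresentB n schedules i)
    if PySem.Set.equal reach people then i else pvLoopB rest n schedules people

def find_minimum_days_to_collect_maps_alt (n : Int) (schedules : List (List Int)) : Int :=
  pvLoopB (PySem.List.pyRange 1 31 1) n schedules
    (PySem.Set.ofList (PySem.List.pyRange 0 n 1))

-- ===== PRECONDITION & SPEC =====
-- Pre_ restricts to the task's natural domain (n ≤ len(schedules), listed days in [0,30]):
-- excluded are n > len(schedules) and listed days ≥ 31 or < -31 (A raises IndexError), and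
-- negative listed days in [-31,-1], malformed inputs on which A's Python negative-index
-- wraparound treats day -k as day 31-k.
def Pre_find_minimum_days_to_collect_maps (n : Int) (schedules : List (List Int)) : Prop :=
  n ≤ schedules.length ∧
  ∀ p ∈ PySem.List.pyRange 0 n 1,
    ∀ d ∈ (PySem.List.pyGetD schedules p []).tail, 0 ≤ d ∧ d ≤ 30
instance (n : Int) (schedules : List (List Int)) :
    Decidable (Pre_find_minimum_days_to_collect_maps n schedules) := by
  unfold Pre_find_minimum_days_to_collect_maps; infer_instance

def pvWitness_find_minimum_days_to_collect_maps : Int × List (List Int) :=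
  (2, [[1, 3], [1, 3, 5]])

-- On inputs with some listed day outside [-31,30] (within the first n schedules,
-- n ≤ len(schedules)) A raises IndexError while B, which never indexes a bucket array
-- by day, returns its normal answer.
def Raises_find_minimum_days_to_collect_maps (n : Int) (schedules : List (List Int)) : Prop :=
  n ≤ schedules.length ∧
  ∃ p ∈ PySem.List.pyRange 0 n 1,
    ∃ d ∈ (PySem.List.pyGetD schedules p []).tail, d < -31 ∨ 31 ≤ d
instance (n : Int) (schedules : List (List Int)) :
    Decidable (Raises_find_minimum_days_to_collect_maps n schedules) := by
  unfold Raises_find_minimum_days_to_collect_maps; infer_instance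

def pvRaiseWitness_find_minimum_days_to_collect_maps : Int × List (List Int) := (1, [[0, 99]])
def pvRaiseWitnessOut_find_minimum_days_to_collect_maps : Int := -1

def Spec_find_minimum_days_to_collect_maps (n : Int) (schedules : List (List Int))
    (out : Int) : Prop := out = find_minimum_days_to_collect_maps_alt n schedules
instance (n : Int) (schedules : List (List Int)) (out : Int) :
    Decidable (Spec_find_minimum_days_to_collect_maps n schedules out) := by
  unfold Spec_find_minimum_days_to_collect_maps; infer_instance

-- ===== CLAIM (what is proved, stated in full; the proofs are below) =====
def Claim_equal_find_minimum_days_to_collect_maps : Prop :=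
  ∀ (n : Int) (schedules : List (List Int)), Dom_find_minimum_days_to_collect_maps n schedules →
    Pre_find_minimum_days_to_collect_maps n schedules →
    Spec_find_minimum_days_to_collect_maps n schedules
      (find_minimum_days_to_collect_maps n schedules)

def Claim_raises_find_minimum_days_to_collect_maps : Prop :=
  (∀ (n : Int) (schedules : List (List Int)), Dom_find_minimum_days_to_collect_maps n schedules →
    Raises_find_minimum_days_to_collect_maps n schedules →
    ¬ Pre_find_minimum_days_to_collect_maps n schedules) ∧
  (Dom_find_minimum_days_to_collect_maps (pvRaiseWitness_find_minimum_days_to_collect_maps.1)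
      (pvRaiseWitness_find_minimum_days_to_collect_maps.2) ∧
    Raises_find_minimum_days_to_collect_maps (pvRaiseWitness_find_minimum_days_to_collect_maps.1)
      (pvRaiseWitness_find_minimum_days_to_collect_maps.2) ∧
    find_minimum_days_to_collect_maps_alt (pvRaiseWitness_find_minimum_days_to_collect_maps.1)
        (pvRaiseWitness_find_minimum_days_to_collect_maps.2) =
      pvRaiseWitnessOut_find_minimum_days_to_collect_maps)

-- ===== LEMMAS AND PROOFS =====

-- basic index lemmas for A's bucket table
theorem pv_len_dayAppend (p : Int) (days : List (List Int)) (d : Int) :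
    (pvDayAppend p days d).length = days.length := by
  simp [pvDayAppend, PySem.List.length_pySetD]

theorem pv_getD_dayAppend (p : Int) (days : List (List Int)) (d i : Int)
    (hd0 : 0 ≤ d) (hi0 : 0 ≤ i) (hil : i < (days.length : Int)) :
    PySem.List.pyGetD (pvDayAppend p days d) i [] =
      if i = d then PySem.List.pyGetD days d [] ++ [p] else PySem.List.pyGetD days i [] := by
  unfold pvDayAppend
  rw [PySem.List.pySetD_of_nonneg _ _ hd0,
      PySem.List.pyGetD_eq_getElem _ _ hi0 (by simpa using hil),
      List.getElem_set]
  split_ifs with h1 h2 h2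
  · rfl
  · omega
  · omega
  · rw [PySem.List.pyGetD_eq_getElem _ _ hi0 (by simpa using hil)]

theorem pv_len_foldl_dayAppend (p : Int) (ds : List Int) (days : List (List Int)) :
    (ds.foldl (pvDayAppend p) days).length = days.length := by
  induction ds generalizing days with
  | nil => rfl
  | cons d ds ih => simp [List.foldl_cons, ih, pv_len_dayAppend]

theorem pv_inner_mem (p : Int) (ds : List Int) (days : List (List Int))
    (hds : ∀ d ∈ ds, 0 ≤ d ∧ d ≤ 30) (hlen : days.length = 31)
    (i q : Int) (hi0 : 0 ≤ i) (hi31 : i < 31) :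
    q ∈ PySem.List.pyGetD (ds.foldl (pvDayAppend p) days) i [] ↔
      q ∈ PySem.List.pyGetD days i [] ∨ (q = p ∧ i ∈ ds) := by
  induction ds generalizing days with
  | nil => simp
  | cons d ds ih =>
    have hd := hds d (by simp)
    rw [List.foldl_cons, ih _ (fun x hx => hds x (by simp [hx]))
        (by rw [pv_len_dayAppend, hlen])]
    rw [pv_getD_dayAppend p days d i hd.1 hi0 (by omega)]
    by_cases hid : i = d <;> simp [hid] <;> tauto

theorem pv_build_mem (schedules : List (List Int)) (ps : List Int) (days : List (List Int))
    (hlen : days.length = 31)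
    (hps : ∀ p ∈ ps, ∀ d ∈ (PySem.List.pyGetD schedules p []).tail, 0 ≤ d ∧ d ≤ 30)
    (i q : Int) (hi0 : 0 ≤ i) (hi31 : i < 31) :
    q ∈ PySem.List.pyGetD
        (ps.foldl (fun days p =>
          (PySem.List.slice (PySem.List.pyGetD schedules p []) (some 1) none).foldl
            (pvDayAppend p) days) days) i [] ↔
      q ∈ PySem.List.pyGetD days i [] ∨
        ∃ p ∈ ps, q = p ∧ i ∈ (PySem.List.pyGetD schedules p []).tail := by
  induction ps generalizing days with
  | nil => simp
  | cons p ps ih =>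
    rw [List.foldl_cons, ih _ (by
      rw [pv_len_foldl_dayAppend]; exact hlen) (fun x hx => hps x (by simp [hx]))]
    rw [PySem.List.slice_from_one]
    rw [pv_inner_mem p _ days (hps p (by simp)) hlen i q hi0 hi31]
    simp only [List.mem_cons]
    constructor
    · rintro (⟨h | ⟨rfl, h⟩⟩ | ⟨x, hx, h1, h2⟩)
      · exact Or.inl h
      · exact Or.inr ⟨q, Or.inl rfl, rfl, h⟩
      · exact Or.inr ⟨x, Or.inr hx, h1, h2⟩
    · rintro (h | ⟨x, hx | hx, h1, h2⟩)
      · exact Or.inl (Or.inl h)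
      · subst hx; exact Or.inl (Or.inr ⟨h1, h1 ▸ h2⟩)
      · exact Or.inr ⟨x, hx, h1, h2⟩

theorem pv_bucket_mem (n : Int) (schedules : List (List Int))
    (hps : ∀ p ∈ PySem.List.pyRange 0 n 1,
      ∀ d ∈ (PySem.List.pyGetD schedules p []).tail, 0 ≤ d ∧ d ≤ 30)
    (i q : Int) (hi0 : 0 ≤ i) (hi31 : i < 31) :
    q ∈ PySem.List.pyGetD (pvBuildDays n schedules) i [] ↔
      (0 ≤ q ∧ q < n) ∧ i ∈ (PySem.List.pyGetD schedules q []).tail := by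
  unfold pvBuildDays
  rw [pv_build_mem schedules _ _ (by simp) hps i q hi0 hi31]
  have hrep : PySem.List.pyGetD (List.replicate 31 ([] : List Int)) i [] = [] := by
    rw [PySem.List.pyGetD_eq_getElem _ _ hi0 (by simpa using hi31)]
    rw [List.getElem_replicate]
  rw [hrep]
  constructor
  · rintro (h | ⟨x, hx, rfl, h⟩)
    · simp at h
    · exact ⟨PySem.List.mem_pyRange_one.mp hx, h⟩
  · rintro ⟨hq, h⟩
    exact Or.inr ⟨q, PySem.List.mem_pyRange_one.mpr hq, rfl, h⟩

-- membership in B's present set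
theorem pv_presentB_mem (n : Int) (schedules : List (List Int)) (d q : Int) :
    q ∈ pvPresentB n schedules d ↔
      (0 ≤ q ∧ q < n) ∧ d ∈ (PySem.List.pyGetD schedules q []).tail := by
  unfold pvPresentB
  rw [PySem.Set.mem_ofList, List.mem_filter, PySem.List.mem_pyRange_one,
      PySem.List.slice_from_one]
  simp

-- gather characterization (A)
theorem pv_mem_gatherA (tos : List (PySem.Set Int)) (l : List Int) (g0 : PySem.Set Int)
    (x : Int) :
    x ∈ l.foldl (fun g q => PySem.Set.union g (PySem.List.pyGetD tos q PySem.Set.empty)) g0 ↔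
      x ∈ g0 ∨ ∃ p ∈ l, x ∈ PySem.List.pyGetD tos p PySem.Set.empty := by
  induction l generalizing g0 with
  | nil => simp
  | cons a l ih =>
    rw [List.foldl_cons, ih]
    rw [PySem.Set.mem_union]
    simp only [List.mem_cons]
    constructor
    · rintro (⟨h | h⟩ | ⟨p, hp, h⟩)
      · exact Or.inl h
      · exact Or.inr ⟨a, Or.inl rfl, h⟩
      · exact Or.inr ⟨p, Or.inr hp, h⟩
    · rintro (h | ⟨p, hp | hp, h⟩)
      · exact Or.inl (Or.inl h)
      · exact Or.inl (Or.inr (hp ▸ h))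
      · exact Or.inr ⟨p, hp, h⟩

-- update characterization (A's broadcast assignment)
theorem pv_len_foldl_setD {α : Type} (g : α) (l : List Int) (t : List α) :
    (l.foldl (fun t p => PySem.List.pySetD t p g) t).length = t.length := by
  induction l generalizing t with
  | nil => rfl
  | cons a l ih => simp [List.foldl_cons, ih, PySem.List.length_pySetD]

theorem pv_getD_foldl_setD {α : Type} (g d0 : α) (l : List Int) (t : List α)
    (hl : ∀ p ∈ l, 0 ≤ p ∧ p < (t.length : Int)) (q : Int) (hq0 : 0 ≤ q)
    (hql : q < (t.length : Int)) :
    PySem.List.pyGetD (l.foldl (fun t p => PySem.List.pySetD t p g) t) q d0 =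
      if q ∈ l then g else PySem.List.pyGetD t q d0 := by
  induction l generalizing t with
  | nil => simp
  | cons a l ih =>
    have ha := hl a (by simp)
    rw [List.foldl_cons, ih _ (fun p hp => by
        rw [PySem.List.pySetD_of_nonneg _ _ ha.1, List.length_set]; exact hl p (by simp [hp]))
      (by rw [PySem.List.pySetD_of_nonneg _ _ ha.1, List.length_set]; exact hql)]
    rw [PySem.List.pySetD_of_nonneg _ _ ha.1]
    by_cases hmem : q ∈ l
    · simp [hmem]
    · simp only [hmem, if_false, List.mem_cons, or_false]
      by_cases hqa : q = a
      · subst hqa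
        rw [PySem.List.pyGetD_eq_getElem _ _ hq0 (by simpa using hql), List.getElem_set]
        simp
      · simp only [hqa, if_false]
        rw [PySem.List.pyGetD_eq_getElem _ _ hq0 (by simpa [List.length_set] using hql),
            List.getElem_set, PySem.List.pyGetD_eq_getElem _ _ hq0 (by simpa using hql)]
        have : ¬ a.toNat = q.toNat := by omega
        simp [this]

-- proof-side model of A's state evolution: one forward day-step and the state after day d
def pvFstep (n : Int) (schedules : List (List Int)) (tos : List (PySem.Set Int))
    (d : Int) : List (PySem.Set Int) :=
  let bucket := PySem.List.pyGetD (pvBuildDays n schedules) d []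
  let g := pvGatherA bucket tos
  bucket.foldl (fun t q => PySem.List.pySetD t q g) tos

def pvF (n : Int) (schedules : List (List Int)) (d : Int) : List (PySem.Set Int) :=
  (PySem.List.pyRange 1 (d + 1) 1).foldl (pvFstep n schedules)
    ((PySem.List.pyRange 0 n 1).map (fun i => PySem.Set.ofList [i]))

theorem pv_len_fstep (n : Int) (schedules : List (List Int)) (tos : List (PySem.Set Int))
    (d : Int) : (pvFstep n schedules tos d).length = tos.length := by
  simp [pvFstep, pv_len_foldl_setD]

theorem pv_len_foldl_fstep (n : Int) (schedules : List (List Int)) (ds : List Int) :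
    ∀ tos, (ds.foldl (pvFstep n schedules) tos).length = tos.length := by
  induction ds with
  | nil => intro tos; rfl
  | cons a ds ih => intro tos; rw [List.foldl_cons, ih, pv_len_fstep]

theorem pv_len_F (n : Int) (schedules : List (List Int)) (d : Int) :
    (pvF n schedules d).length = n.toNat := by
  unfold pvF
  rw [pv_len_foldl_fstep, List.length_map, PySem.List.length_pyRange_one]
  omega

theorem pv_F_succ (n : Int) (schedules : List (List Int)) (d : Int) (hd : 0 ≤ d) :
    pvF n schedules (d + 1) = pvFstep n schedules (pvF n schedules d) (d + 1) := by
  unfold pvF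
  rw [PySem.List.pyRange_one_succ_right (by omega), List.foldl_append]
  rfl

-- the backward-scan invariant: union of A's day-d state over R = B's backward closure of R
theorem pv_back_inv (n : Int) (schedules : List (List Int))
    (hps : ∀ p ∈ PySem.List.pyRange 0 n 1,
      ∀ d ∈ (PySem.List.pyGetD schedules p []).tail, 0 ≤ d ∧ d ≤ 30)
    (k : Nat) (hk : k ≤ 30) (R : PySem.Set Int) (hR : ∀ r ∈ R, 0 ≤ r ∧ r < n) (x : Int) :
    (∃ p ∈ R, x ∈ PySem.List.pyGetD (pvF n schedules (k : Int)) p PySem.Set.empty) ↔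
      x ∈ pvBackB n schedules (PySem.List.pyRange 1 ((k : Int) + 1) 1).reverse R := by
  induction k generalizing R with
  | zero =>
    rw [show ((0 : Nat) : Int) + 1 = 0 + 1 from rfl,
        PySem.List.pyRange_one_eq_nil (a := 1) (b := 0 + 1) (by omega)]
    have hF : pvF n schedules ((0 : Nat) : Int) =
        (PySem.List.pyRange 0 n 1).map (fun i => PySem.Set.ofList [i]) := by
      unfold pvF
      rw [PySem.List.pyRange_one_eq_nil (a := 1) (b := ((0 : Nat) : Int) + 1) (by omega)]
      rfl
    rw [hF]
    show _ ↔ x ∈ R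
    constructor
    · rintro ⟨p, hp, hx⟩
      obtain ⟨hp0, hpn⟩ := hR p hp
      rw [PySem.List.pyGetD_map_pyRange_of_nonneg _ _ _ _ hp0 hpn] at hx
      rw [PySem.Set.mem_ofList, List.mem_singleton] at hx
      exact hx ▸ hp
    · intro hx
      obtain ⟨hx0, hxn⟩ := hR x hx
      refine ⟨x, hx, ?_⟩
      rw [PySem.List.pyGetD_map_pyRange_of_nonneg _ _ _ _ hx0 hxn]
      rw [PySem.Set.mem_ofList]
      exact List.mem_singleton.mpr rfl
  | succ k ih =>
    have hk' : (k : Nat) ≤ 30 := by omega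
    have hc : ((k + 1 : Nat) : Int) = (k : Int) + 1 := by push_cast; ring
    rw [hc]
    rw [PySem.List.pyRange_one_succ_right (by omega : (1 : Int) ≤ (k : Int) + 1),
        List.reverse_append, List.reverse_singleton, List.singleton_append]
    have hFs : pvF n schedules ((k : Int) + 1) =
        pvFstep n schedules (pvF n schedules (k : Int)) ((k : Int) + 1) :=
      pv_F_succ n schedules (k : Int) (by omega)
    rw [hFs]
    set tos := pvF n schedules (k : Int) with htos
    set bucket := PySem.List.pyGetD (pvBuildDays n schedules) ((k : Int) + 1) [] with hbk
    set g := pvGatherA bucket tos with hg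
    set P := pvPresentB n schedules ((k : Int) + 1) with hP
    have hlen : (tos.length : Int) = (n.toNat : Int) := by rw [htos, pv_len_F]
    have hbmem : ∀ q, q ∈ bucket ↔ q ∈ P := by
      intro q
      rw [hbk, hP, pv_bucket_mem n schedules hps _ q (by omega) (by omega),
          pv_presentB_mem]
    have hPbnd : ∀ q ∈ P, 0 ≤ q ∧ q < n := fun q hq =>
      ((pv_presentB_mem n schedules _ q).mp hq).1
    have hget : ∀ p, 0 ≤ p → p < n →
        PySem.List.pyGetD (pvFstep n schedules tos ((k : Int) + 1)) p PySem.Set.empty =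
          if p ∈ bucket then g else PySem.List.pyGetD tos p PySem.Set.empty := by
      intro p hp0 hpn
      show PySem.List.pyGetD
        (bucket.foldl (fun t q => PySem.List.pySetD t q g) tos) p PySem.Set.empty = _
      exact pv_getD_foldl_setD g PySem.Set.empty bucket tos
        (fun q hq => by
          have := hPbnd q ((hbmem q).mp hq)
          omega)
        p hp0 (by omega)
    have hgm : ∀ y, y ∈ g ↔ ∃ q ∈ bucket, y ∈ PySem.List.pyGetD tos q PySem.Set.empty := by
      intro y
      rw [hg]
      unfold pvGatherA
      rw [pv_mem_gatherA]
      simp [PySem.Set.empty]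
    -- one backward step of B
    show (∃ p ∈ R, x ∈ PySem.List.pyGetD (pvFstep n schedules tos ((k : Int) + 1)) p
        PySem.Set.empty) ↔
      x ∈ pvBackB n schedules ((PySem.List.pyRange 1 ((k : Int) + 1) 1).reverse)
        (if PySem.Set.isdisjoint R P then R else PySem.Set.union R P)
    by_cases hdis : PySem.Set.isdisjoint R P = true
    · have hnot : ∀ r ∈ R, r ∉ P := (PySem.Set.isdisjoint_iff R P).mp hdis
      rw [if_pos hdis, ← ih hk' R hR]
      constructor
      · rintro ⟨p, hp, hx⟩
        obtain ⟨hp0, hpn⟩ := hR p hp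
        rw [hget p hp0 hpn, if_neg (fun h => hnot p hp ((hbmem p).mp h))] at hx
        exact ⟨p, hp, hx⟩
      · rintro ⟨p, hp, hx⟩
        obtain ⟨hp0, hpn⟩ := hR p hp
        refine ⟨p, hp, ?_⟩
        rw [hget p hp0 hpn, if_neg (fun h => hnot p hp ((hbmem p).mp h))]
        exact hx
    · obtain ⟨r0, hr0R, hr0P⟩ : ∃ r ∈ R, r ∈ P := by
        by_contra hcon
        push Not at hcon
        exact hdis ((PySem.Set.isdisjoint_iff R P).mpr hcon)
      have hR1 : ∀ r ∈ PySem.Set.union R P, 0 ≤ r ∧ r < n := by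
        intro r hr
        rcases (PySem.Set.mem_union _ _ _).mp hr with h | h
        · exact hR r h
        · exact hPbnd r h
      rw [if_neg hdis, ← ih hk' (PySem.Set.union R P) hR1]
      constructor
      · rintro ⟨p, hp, hx⟩
        obtain ⟨hp0, hpn⟩ := hR p hp
        rw [hget p hp0 hpn] at hx
        by_cases hb : p ∈ bucket
        · rw [if_pos hb] at hx
          obtain ⟨q, hq, hxq⟩ := (hgm x).mp hx
          exact ⟨q, (PySem.Set.mem_union _ _ _).mpr (Or.inr ((hbmem q).mp hq)), hxq⟩
        · rw [if_neg hb] at hx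
          exact ⟨p, (PySem.Set.mem_union _ _ _).mpr (Or.inl hp), hx⟩
      · rintro ⟨p, hp, hx⟩
        rcases (PySem.Set.mem_union _ _ _).mp hp with hpR | hpP
        · obtain ⟨hp0, hpn⟩ := hR p hpR
          refine ⟨p, hpR, ?_⟩
          rw [hget p hp0 hpn]
          by_cases hb : p ∈ bucket
          · rw [if_pos hb]
            exact (hgm x).mpr ⟨p, hb, hx⟩
          · rw [if_neg hb]
            exact hx
        · obtain ⟨hr0, hrn⟩ := hR r0 hr0R
          refine ⟨r0, hr0R, ?_⟩
          rw [hget r0 hr0 hrn, if_pos ((hbmem r0).mpr hr0P)]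
          exact (hgm x).mpr ⟨p, (hbmem p).mpr hpP, hx⟩

-- both loops test the same condition at each day and then agree
theorem pv_outer (n : Int) (schedules : List (List Int))
    (hps : ∀ p ∈ PySem.List.pyRange 0 n 1,
      ∀ d ∈ (PySem.List.pyGetD schedules p []).tail, 0 ≤ d ∧ d ≤ 30) :
    ∀ (k : Nat) (j : Int), j + k = 31 → 1 ≤ j →
      pvLoopA (PySem.List.pyRange j 31 1) (pvBuildDays n schedules)
          (pvF n schedules (j - 1)) (PySem.Set.ofList (PySem.List.pyRange 0 n 1)) =
        pvLoopB (PySem.List.pyRange j 31 1) n schedules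
          (PySem.Set.ofList (PySem.List.pyRange 0 n 1)) := by
  intro k
  induction k with
  | zero =>
    intro j hk hj
    rw [PySem.List.pyRange_one_eq_nil (a := j) (b := 31) (by omega)]
    rfl
  | succ k ih =>
    intro j hk hj
    have hj31 : j < 31 := by omega
    rw [PySem.List.pyRange_one_cons hj31]
    simp only [pvLoopA, pvLoopB]
    set endS := PySem.Set.ofList (PySem.List.pyRange 0 n 1) with hend
    set tos := pvF n schedules (j - 1) with htos
    set bucket := PySem.List.pyGetD (pvBuildDays n schedules) j [] with hbk
    set gA := pvGatherA bucket tos with hgA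
    set reach := pvBackB n schedules (PySem.List.pyRange 1 j 1).reverse
      (pvPresentB n schedules j) with hreach
    -- the two day-j conditions test equal sets
    have hmem : ∀ x, x ∈ gA ↔ x ∈ reach := by
      intro x
      obtain ⟨k', hk'⟩ : ∃ k' : Nat, ((k' : Nat) : Int) = j - 1 := ⟨(j - 1).toNat, by omega⟩
      have hb := pv_back_inv n schedules hps k' (by omega) (pvPresentB n schedules j)
        (fun q hq => ((pv_presentB_mem n schedules j q).mp hq).1) x
      rw [hk', show j - 1 + 1 = j by ring] at hb
      rw [hreach, ← hb]
      rw [hgA]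
      unfold pvGatherA
      rw [pv_mem_gatherA]
      have hbmem : ∀ q, q ∈ bucket ↔ q ∈ pvPresentB n schedules j := by
        intro q
        rw [hbk, pv_bucket_mem n schedules hps _ q (by omega) (by omega), pv_presentB_mem]
      constructor
      · rintro (h | ⟨p, hp, hx⟩)
        · simp [PySem.Set.empty] at h
        · exact ⟨p, (hbmem p).mp hp, hx⟩
      · rintro ⟨p, hp, hx⟩
        exact Or.inr ⟨p, (hbmem p).mpr hp, hx⟩
    have hcond : PySem.Set.equal gA endS = PySem.Set.equal reach endS := by
      by_cases hA : PySem.Set.equal gA endS = true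
      · have := (PySem.Set.equal_iff _ _).mp hA
        rw [hA, ((PySem.Set.equal_iff _ _).mpr (fun x => ((hmem x).symm.trans (this x)))).symm]
      · rcases hB : PySem.Set.equal reach endS with _ | _
        · simp [hA]
        · exact absurd ((PySem.Set.equal_iff _ _).mpr
            (fun x => (hmem x).trans ((PySem.Set.equal_iff _ _).mp hB x))) hA
    rw [hcond]
    by_cases hfull : PySem.Set.equal reach endS = true
    · rw [if_pos hfull, if_pos hfull]
    · rw [if_neg hfull, if_neg hfull]
      have hnext : bucket.foldl (fun t q => PySem.List.pySetD t q gA) tos =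
          pvF n schedules (j + 1 - 1) := by
        rw [show j + 1 - 1 = (j - 1) + 1 by ring,
            pv_F_succ n schedules (j - 1) (by omega), show j - 1 + 1 = j by ring]
        rfl
      rw [hnext]
      exact ih (j + 1) (by omega) (by omega)

theorem pv_main (n : Int) (schedules : List (List Int))
    (h : Pre_find_minimum_days_to_collect_maps n schedules) :
    find_minimum_days_to_collect_maps n schedules =
      find_minimum_days_to_collect_maps_alt n schedules := by
  obtain ⟨hlen, hps⟩ := h
  unfold find_minimum_days_to_collect_maps find_minimum_days_to_collect_maps_alt
  have h0 : pvF n schedules 0 = (PySem.List.pyRange 0 n 1).map (fun i => PySem.Set.ofList [i]) := by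
    unfold pvF
    rw [PySem.List.pyRange_one_eq_nil (a := 1) (b := 0 + 1) (by omega)]
    rfl
  have := pv_outer n schedules hps 30 1 (by omega) (by omega)
  rw [show (1 : Int) - 1 = 0 from rfl, h0] at this
  exact this

-- ===== VERDICT (by name: the statement is the Claim_ definition above) =====
theorem find_minimum_days_to_collect_maps_spec :
    Claim_equal_find_minimum_days_to_collect_maps := by
  intro n schedules _ hPre
  unfold Spec_find_minimum_days_to_collect_maps
  exact pv_main n schedules hPre

@[simp] theorem find_minimum_days_to_collect_maps_raises :
    Claim_raises_find_minimum_days_to_collect_maps := by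
  unfold Claim_raises_find_minimum_days_to_collect_maps
  refine ⟨?_, by decide⟩
  rintro n schedules _ ⟨hlen, p, hp, d, hd, hout⟩ ⟨hlen', hps⟩
  have := hps p hp d hd
  omega
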